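-- pv_equiv track=rewrite | github.com/Worthy-Programmer/AOC | 2025/day6/sol2.py | interpret_operation_line
-- ===== SOURCE A (Python) =====
-- def interpret_operation_line(l):
--     operations = [] # ('*', length before the next operations)
--
--     d = 0
--     prev_op = None
--     for i in l:
--         if i in '*+':
--             if prev_op is not None:
--                 operations.append((prev_op, d))
--             prev_op = i
--             d = 0
--         else: d += 1
--
--     operations.append((prev_op, d))
--
--     return operations
-- ===== SOURCE B (Python) =====
-- def interpret_operation_line(l):
--     ops = '*+'
--     k = next((i for i, c in enumerate(l) if c in ops), None)
--     if k is None: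
--         return [(None, len(l))]
--     res = []
--     rest = l[k:]
--     while rest:
--         op = rest[0]
--         j = 1
--         while j < len(rest) and rest[j] not in ops:
--             j += 1
--         res.append((op, j - 1))
--         rest = rest[j:]
--     return res
-- ===== Notes on version B (the rewrite author's own statement) =====
-- stated objective: alternative
-- what changed: B jumps to the first operator and then consumes the string segment-by-segment (span to the next operator, emit (op, gap), slice past it), instead of A's char-by-char scan maintaining a pending operator and counter; the no-operator case returns [(None, len(l))] directly.
import Mathlib
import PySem

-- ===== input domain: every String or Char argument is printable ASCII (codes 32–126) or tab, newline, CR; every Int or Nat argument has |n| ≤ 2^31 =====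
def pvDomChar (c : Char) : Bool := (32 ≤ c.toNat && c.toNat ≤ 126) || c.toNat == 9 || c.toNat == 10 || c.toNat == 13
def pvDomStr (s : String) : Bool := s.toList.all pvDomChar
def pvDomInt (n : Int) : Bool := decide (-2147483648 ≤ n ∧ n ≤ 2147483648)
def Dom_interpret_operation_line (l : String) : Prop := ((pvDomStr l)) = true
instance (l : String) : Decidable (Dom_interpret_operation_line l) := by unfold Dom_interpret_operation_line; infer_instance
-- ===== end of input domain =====

-- B replaces A's single-pass pending-operator/counter scan by jump-to-first-operator and
-- segment-by-segment spans (objective: alternative decomposition, same cost).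

-- ===== PORT A =====
-- 'i in "*+"'
def pvIsOp (c : Char) : Bool := c = '*' || c = '+'

-- one loop step over state (operations, d, prev_op)
def pvStepA (st : List (Option String × Int) × Int × Option String) (c : Char) :
    List (Option String × Int) × Int × Option String :=
  let (ops, d, prev) := st
  if pvIsOp c then
    (ops ++ (match prev with | none => [] | some p => [(some p, d)]), 0, some (String.ofList [c]))
  else
    (ops, d + 1, prev)

def interpret_operation_line (l : String) : List (Option String × Int) :=
  let st := l.toList.foldl pvStepA ([], 0, none)
  st.1 ++ [(st.2.2, st.2.1)]

-- ===== PORT B =====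
-- the inner while: emit (rest[0], gap to next operator), continue past it (rest = rest[j:])
def pvSegsB : List Char → List (Option String × Int)
  | [] => []
  | c :: rest =>
    (some (String.ofList [c]), ((rest.takeWhile (fun x => !pvIsOp x)).length : Int)) ::
      pvSegsB (rest.dropWhile (fun x => !pvIsOp x))
termination_by cs => cs.length
decreasing_by
  simp only [List.length_cons]
  exact Nat.lt_succ_of_le (List.length_dropWhile_le _ _)

def interpret_operation_line_alt (l : String) : List (Option String × Int) :=
  let cs := l.toList
  -- k = index of first operator, None if absent; l[k:] = drop the non-operator prefix
  let rest := cs.dropWhile (fun x => !pvIsOp x)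
  match rest with
  | [] => [(none, (cs.length : Int))]
  | _ :: _ => pvSegsB rest

-- ===== PRECONDITION & SPEC =====
def Spec_interpret_operation_line (l : String) (out : List (Option String × Int)) : Prop := out = interpret_operation_line_alt l
instance (l : String) (out : List (Option String × Int)) : Decidable (Spec_interpret_operation_line l out) := by unfold Spec_interpret_operation_line; infer_instance

-- ===== CLAIM (what is proved, stated in full; the proofs are below) =====
def Claim_equal_interpret_operation_line : Prop := ∀ (l : String), Dom_interpret_operation_line l → Spec_interpret_operation_line l (interpret_operation_line l)

-- ===== LEMMAS AND PROOFS =====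

theorem pvSegsB_cons (c : Char) (rest : List Char) :
    pvSegsB (c :: rest) =
      (some (String.ofList [c]), ((rest.takeWhile (fun x => !pvIsOp x)).length : Int)) ::
        pvSegsB (rest.dropWhile (fun x => !pvIsOp x)) := by
  rw [pvSegsB.eq_def]

-- the "rest of A's result" computed from mid-loop state (d, prev) over the remaining chars
def pvTailA (d : Int) (prev : Option String) : List Char → List (Option String × Int)
  | [] => [(prev, d)]
  | c :: cs =>
    if pvIsOp c then
      (match prev with | none => [] | some p => [(some p, d)]) ++ pvTailA 0 (some (String.ofList [c])) cs
    else
      pvTailA (d + 1) prev cs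

theorem pvFoldA_eq_tail (cs : List Char) :
    ∀ (ops : List (Option String × Int)) (d : Int) (prev : Option String),
      (let st := cs.foldl pvStepA (ops, d, prev); st.1 ++ [(st.2.2, st.2.1)]) =
        ops ++ pvTailA d prev cs := by
  induction cs with
  | nil => intro ops d prev; simp [pvTailA]
  | cons c cs ih =>
    intro ops d prev
    simp only [List.foldl_cons, pvStepA, pvTailA]
    by_cases h : pvIsOp c
    · simp only [h, if_true]
      rw [ih]
      cases prev <;> simp
    · simp only [h]
      exact ih ops (d + 1) prev

theorem pvTailA_some (cs : List Char) :
    ∀ (d : Int) (s : String),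
      pvTailA d (some s) cs =
        (some s, d + ((cs.takeWhile (fun x => !pvIsOp x)).length : Int)) ::
          pvSegsB (cs.dropWhile (fun x => !pvIsOp x)) := by
  induction cs with
  | nil => intro d s; simp [pvTailA, pvSegsB]
  | cons c cs ih =>
    intro d s
    by_cases h : pvIsOp c
    · rw [pvTailA, List.takeWhile_cons, List.dropWhile_cons]
      simp [h, ih, pvSegsB_cons]
    · rw [pvTailA]
      simp [h]
      rw [ih]
      ring_nf

theorem pvTailA_none (cs : List Char) :
    ∀ (d : Int),
      pvTailA d none cs =
        match cs.dropWhile (fun x => !pvIsOp x) with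
        | [] => [(none, d + (cs.length : Int))]
        | _ :: _ => pvSegsB (cs.dropWhile (fun x => !pvIsOp x)) := by
  induction cs with
  | nil => intro d; simp [pvTailA]
  | cons c cs ih =>
    intro d
    by_cases h : pvIsOp c
    · rw [pvTailA, List.dropWhile_cons]
      simp [h, pvTailA_some, pvSegsB_cons]
    · rw [pvTailA]
      simp [h]
      rw [ih]
      cases hdw : cs.dropWhile (fun x => !pvIsOp x) with
      | nil =>
        simp
        ring_nf
      | cons a as => simp

-- ===== VERDICT (by name: the statement is the Claim_ definition above) =====
theorem interpret_operation_line_spec : Claim_equal_interpret_operation_line := by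
  intro l _
  unfold Spec_interpret_operation_line interpret_operation_line interpret_operation_line_alt
  rw [pvFoldA_eq_tail, pvTailA_none]
  simp only [List.nil_append]
  cases h : l.toList.dropWhile (fun x => !pvIsOp x) with
  | nil => simp
  | cons a as => simp
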